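-- pv_equiv track=rewrite | github.com/Boom5426/DrugClaw | drugclaw/eval_runner.py | _contains_conflict_signal
-- ===== SOURCE A (Python) =====
-- from typing import Any, Callable, Dict, Iterable, List, Sequence
--
-- def _contains_conflict_signal(values: Sequence[str]) -> bool:
--     conflict_terms = (
--         "conflict",
--         "conflicting",
--         "discord",
--         "disagree",
--         "inconsistent",
--     )
--     return any(any(term in value for term in conflict_terms) for value in _normalized_values(values))
--
-- def _normalized_values(values: Sequence[str]) -> List[str]:
--     normalized: List[str] = []
--     for value in values:
--         text = str(value or "").strip().lower()
--         if text and text not in normalized: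
--             normalized.append(text)
--     return normalized
-- ===== SOURCE B (Python) =====
-- def _contains_conflict_signal(values):
--     # One short-circuiting pass: normalize each value inline and test the four
--     # distinct terms directly ("conflicting" is redundant: it contains "conflict");
--     # no deduplicated intermediate list is built.
--     for value in values:
--         text = str(value or "").strip().lower()
--         if ("conflict" in text or "discord" in text
--                 or "disagree" in text or "inconsistent" in text):
--             return True
--     return False
-- ===== Notes on version B (the rewrite author's own statement) =====
-- stated objective: faster
-- what changed: B replaces A's build-a-deduplicated-normalized-list-then-nested-any (whose 'text not in normalized' membership scan is quadratic) with a single short-circuiting pass that normalizes each value inline and tests the four distinct terms, dropping the redundant term 'conflicting' (it always contains 'conflict') and the dedup/empty filtering, which cannot change the bool.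
import Mathlib
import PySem

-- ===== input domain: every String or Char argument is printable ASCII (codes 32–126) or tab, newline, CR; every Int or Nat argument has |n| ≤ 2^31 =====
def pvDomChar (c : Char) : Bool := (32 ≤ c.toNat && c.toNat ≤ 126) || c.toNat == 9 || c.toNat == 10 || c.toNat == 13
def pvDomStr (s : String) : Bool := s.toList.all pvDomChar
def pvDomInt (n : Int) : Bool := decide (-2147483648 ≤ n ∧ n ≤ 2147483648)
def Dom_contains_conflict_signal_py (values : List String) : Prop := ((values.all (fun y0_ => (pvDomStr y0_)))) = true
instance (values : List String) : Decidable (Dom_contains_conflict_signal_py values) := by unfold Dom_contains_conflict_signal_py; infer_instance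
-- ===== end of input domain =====

-- B replaces A's deduplicated-normalized-list + nested any with one short-circuiting
-- pass that normalizes inline and tests the four distinct terms (objective: simpler).


-- ===== PORT A =====
-- str(value or "").strip().lower(): on a str argument, `value or ""` is `value` itself
-- (it is "" exactly when value == ""), so the normalization is strip-then-lower.
def pvNormA (value : String) : String :=
  PySem.Str.lower (PySem.Str.strip value)

-- _normalized_values: the accumulator loop with the `if text and text not in normalized` guard
def pvNormalizedValues (values : List String) : List String :=
  values.foldl
    (fun normalized value =>
      let text := pvNormA value
      if text ≠ "" && !(normalized.contains text) then normalized ++ [text] else normalized)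
    []

def pvConflictTerms : List String :=
  ["conflict", "conflicting", "discord", "disagree", "inconsistent"]

def contains_conflict_signal_py (values : List String) : Bool :=
  (pvNormalizedValues values).any
    (fun value => pvConflictTerms.any (fun term => PySem.Str.isIn term value))

-- ===== PORT B =====
def contains_conflict_signal_py_alt (values : List String) : Bool :=
  match values with
  | [] => false
  | value :: rest =>
    let text := PySem.Str.lower (PySem.Str.strip value)
    if PySem.Str.isIn "conflict" text || PySem.Str.isIn "discord" text
        || PySem.Str.isIn "disagree" text || PySem.Str.isIn "inconsistent" text then
      true
    else
      contains_conflict_signal_py_alt rest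

-- ===== PRECONDITION & SPEC =====
def Spec_contains_conflict_signal_py (values : List String) (out : Bool) : Prop := out = contains_conflict_signal_py_alt values
instance (values : List String) (out : Bool) : Decidable (Spec_contains_conflict_signal_py values out) := by unfold Spec_contains_conflict_signal_py; infer_instance

-- ===== CLAIM (what is proved, stated in full; the proofs are below) =====
def Claim_equal_contains_conflict_signal_py : Prop := ∀ (values : List String), Dom_contains_conflict_signal_py values → Spec_contains_conflict_signal_py values (contains_conflict_signal_py values)

-- ===== LEMMAS AND PROOFS =====

-- B's per-value test, as a predicate on the normalized text
def pvPred4 (t : String) : Bool :=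
  PySem.Str.isIn "conflict" t || PySem.Str.isIn "discord" t
    || PySem.Str.isIn "disagree" t || PySem.Str.isIn "inconsistent" t

-- A's per-value test over the five terms
def pvPred5 (t : String) : Bool :=
  pvConflictTerms.any (fun term => PySem.Str.isIn term t)

-- "conflicting" in t implies "conflict" in t ("conflict" is an infix of "conflicting")
lemma pvConflicting_imp (t : String) :
    PySem.Str.isIn "conflicting" t = true → PySem.Str.isIn "conflict" t = true := by
  intro h
  rw [PySem.Str.isIn_iff_infix] at h ⊢
  exact List.IsInfix.trans (l₂ := "conflicting".toList) (by decide) h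

-- so the five-term test equals the four-term one
lemma pvPred5_eq_pred4 (t : String) : pvPred5 t = pvPred4 t := by
  unfold pvPred5 pvPred4 pvConflictTerms
  simp only [List.any_cons, List.any_nil, Bool.or_false]
  cases hg : PySem.Str.isIn "conflicting" t
  · simp [Bool.or_assoc]
  · rw [pvConflicting_imp t hg]; simp

lemma pvPred5_empty : pvPred5 "" = false := by decide

-- the dedup/empty-filter fold does not change `any pvPred5`
lemma pvFold_any (values : List String) (acc : List String) :
    ((values.foldl
      (fun normalized value =>
        let text := pvNormA value
        if text ≠ "" && !(normalized.contains text) then normalized ++ [text] else normalized)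
      acc).any pvPred5)
    = (acc.any pvPred5 || values.any (fun v => pvPred5 (pvNormA v))) := by
  induction values generalizing acc with
  | nil => simp
  | cons v rest ih =>
    simp only [List.foldl_cons, List.any_cons]
    by_cases hguard : (pvNormA v ≠ "" && !(acc.contains (pvNormA v))) = true
    · simp only [hguard, if_pos, ih, List.any_append, List.any_cons, List.any_nil,
        Bool.or_false]
      cases acc.any pvPred5 <;> cases pvPred5 (pvNormA v) <;>
        cases rest.any (fun v => pvPred5 (pvNormA v)) <;> rfl
    · simp only [if_neg hguard, ih]
      -- guard false: either the text is empty (pred false) or it is already in acc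
      have hpt : pvPred5 (pvNormA v) = true → acc.any pvPred5 = true := by
        intro hp
        have hne : pvNormA v ≠ "" := by
          intro he; rw [he, pvPred5_empty] at hp; cases hp
        have hcont : acc.contains (pvNormA v) = true := by
          rcases Bool.and_eq_false_iff.mp (Bool.eq_false_iff.mpr hguard) with h | h
          · simp [hne] at h
          · simpa using h
        exact List.any_eq_true.mpr ⟨_, by simpa using hcont, hp⟩
      cases hpv : pvPred5 (pvNormA v)
      · simp
      · simp [hpt hpv]

-- B is `any` of the four-term predicate on the normalized values
lemma pvAlt_cons (v : String) (rest : List String) :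
    contains_conflict_signal_py_alt (v :: rest)
      = (pvPred4 (pvNormA v) || contains_conflict_signal_py_alt rest) := by
  cases h : pvPred4 (pvNormA v) <;>
  · unfold pvPred4 pvNormA at h
    rw [contains_conflict_signal_py_alt]
    simp only [h]
    simp

-- B is `any` of the four-term predicate on the normalized values
lemma pvAlt_eq_any (values : List String) :
    contains_conflict_signal_py_alt values
      = values.any (fun v => pvPred4 (pvNormA v)) := by
  induction values with
  | nil => rfl
  | cons v rest ih => rw [pvAlt_cons, List.any_cons, ih]

-- ===== VERDICT (by name: the statement is the Claim_ definition above) =====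
theorem contains_conflict_signal_py_spec : Claim_equal_contains_conflict_signal_py := by
  intro values _
  show contains_conflict_signal_py values = contains_conflict_signal_py_alt values
  rw [pvAlt_eq_any]
  have h5 : contains_conflict_signal_py values
      = values.any (fun v => pvPred5 (pvNormA v)) := by
    have := pvFold_any values []
    simpa [contains_conflict_signal_py, pvNormalizedValues, pvPred5] using this
  rw [h5]
  simp only [pvPred5_eq_pred4]
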